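-- pv_equiv track=rewrite | github.com/Moshe-Malka/CodeFights_files | assignment2.py | periodicSequence
-- ===== SOURCE A (Python) =====
-- def periodicSequence(s0, a, b, m):
--     s=[]
--     s.append(s0)
--     for i in range(1,100):
--         s.append((a * s[i - 1] + b) % m)
--
--     count=0
--     d = {i:s.count(i) for i in s}
--     # for i in d:
--     #     if d[i]==max(d.values()): count+=1
--
--     # this works
--     for j in d:
--         if d[j]>1: count+=1
--     return count
-- ===== SOURCE B (Python) =====
-- def periodicSequence(s0, a, b, m):
--     def gen(x, k):
--         if k == 0:
--             return [x]
--         return [x] + gen((a * x + b) % m, k - 1)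
--
--     def dups(t):
--         if len(t) < 2:
--             return 0
--         if t[0] == t[1]:
--             return 1 + dups([z for z in t if z != t[0]])
--         return dups(t[1:])
--
--     return dups(sorted(gen(s0, 99)))
-- ===== Notes on version B (the rewrite author's own statement) =====
-- stated objective: alternative
-- what changed: replaces the quadratic count-dictionary comprehension plus threshold re-scan with recursive sequence generation followed by sorting and a recursive scan of the sorted list that counts runs of length >= 2
import Mathlib
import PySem

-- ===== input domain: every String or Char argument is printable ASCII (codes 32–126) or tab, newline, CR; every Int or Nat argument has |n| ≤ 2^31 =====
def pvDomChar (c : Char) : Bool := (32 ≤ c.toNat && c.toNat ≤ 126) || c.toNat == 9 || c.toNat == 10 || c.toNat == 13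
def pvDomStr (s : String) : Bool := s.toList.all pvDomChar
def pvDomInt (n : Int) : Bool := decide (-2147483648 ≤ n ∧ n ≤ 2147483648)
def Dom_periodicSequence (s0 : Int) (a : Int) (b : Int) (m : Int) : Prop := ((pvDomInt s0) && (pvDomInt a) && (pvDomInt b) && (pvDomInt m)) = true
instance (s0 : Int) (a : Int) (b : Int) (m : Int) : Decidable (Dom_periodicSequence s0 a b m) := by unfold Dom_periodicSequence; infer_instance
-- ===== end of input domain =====

-- B replaces A's count-dictionary + threshold re-scan by recursive sequence generation, sorting, and a recursive scan of the sorted list counting runs of length >= 2 (alternative algorithm, same return values).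


-- ===== PORT A =====
def periodicSequence (s0 : Int) (a : Int) (b : Int) (m : Int) : Int :=
  -- s=[s0]; for i in range(1,100): s.append((a*s[i-1]+b) % m)
  let s : List Int := (PySem.List.pyRange 1 100 1).foldl
      (fun s i => s ++ [PySem.Int.mod (a * PySem.List.pyGetD s (i - 1) 0 + b) m]) [s0]
  -- d = {i: s.count(i) for i in s}
  let d : PySem.Dict Int Int := s.foldl
      (fun d i => d.insert i ((PySem.List.count s i : Int))) PySem.Dict.empty
  -- for j in d: if d[j] > 1: count += 1   (every j iterated is a key of d, so getD is exact for d[j])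
  d.keys.foldl (fun count j => if 1 < d.getD j 0 then count + 1 else count) 0

-- ===== PORT B =====
-- def gen(x, k): return [x] if k == 0 else [x] + gen((a*x+b) % m, k-1)
def pvGen (a : Int) (b : Int) (m : Int) (x : Int) (k : Nat) : List Int :=
  match k with
  | 0 => [x]
  | k' + 1 => x :: pvGen a b m (PySem.Int.mod (a * x + b) m) k'

-- def dups(t): if len(t)<2: 0; if t[0]==t[1]: 1+dups([z for z in t if z != t[0]]); else dups(t[1:])
def pvDups (t : List Int) : Int :=
  match t with
  | [] => 0
  | [_] => 0
  | x :: y :: r =>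
      if x = y then 1 + pvDups ((x :: y :: r).filter (fun z => z != x))
      else pvDups (y :: r)
termination_by t.length
decreasing_by
  · have h1 := List.length_filter_le (fun z => z != x) (y :: r)
    have h2 : (x :: y :: r).filter (fun z => z != x) = (y :: r).filter (fun z => z != x) := by
      simp [List.filter_cons]
    simp only [h2, List.length_cons] at *
    omega
  · simp

def periodicSequence_alt (s0 : Int) (a : Int) (b : Int) (m : Int) : Int :=
  pvDups (PySem.List.sorted (pvGen a b m s0 99) (fun x => x) false)

-- ===== PRECONDITION & SPEC =====
-- Pre_ excludes exactly m = 0, where Python's '%' raises ZeroDivisionError (in both A and B).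
def Pre_periodicSequence (s0 : Int) (a : Int) (b : Int) (m : Int) : Prop := m ≠ 0
instance (s0 : Int) (a : Int) (b : Int) (m : Int) : Decidable (Pre_periodicSequence s0 a b m) := by unfold Pre_periodicSequence; infer_instance
def pvWitness_periodicSequence : Int × Int × Int × Int := (1, 2, 3, 10)

def Spec_periodicSequence (s0 : Int) (a : Int) (b : Int) (m : Int) (out : Int) : Prop := out = periodicSequence_alt s0 a b m
instance (s0 : Int) (a : Int) (b : Int) (m : Int) (out : Int) : Decidable (Spec_periodicSequence s0 a b m out) := by unfold Spec_periodicSequence; infer_instance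

-- ===== CLAIM (what is proved, stated in full; the proofs are below) =====
def Claim_equal_periodicSequence : Prop := ∀ (s0 : Int) (a : Int) (b : Int) (m : Int), Dom_periodicSequence s0 a b m → Pre_periodicSequence s0 a b m → Spec_periodicSequence s0 a b m (periodicSequence s0 a b m)

-- ===== LEMMAS AND PROOFS =====

-- number of distinct values occurring at least twice in t (the common meaning of both counting passes)
def dupCount (t : List Int) : Nat :=
  ((PySem.Set.ofList t).filter (fun x => decide (2 ≤ t.count x))).length

-- A's sequence-building loop: s[i-1] is the last element because s has length i at step i
lemma foldl_idx_last (f : Int → Int) (n : Nat) :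
    ∀ (l : List Int) (x : Int), l.getLast? = some x →
    (PySem.List.pyRange (l.length : Int) ((l.length : Int) + n) 1).foldl
        (fun s i => s ++ [f (PySem.List.pyGetD s (i - 1) 0)]) l
      = l ++ (List.range n).map (fun k => f^[k+1] x) := by
  induction n with
  | zero => intro l x _; simp [PySem.List.pyRange_one_eq_nil]
  | succ m ih =>
      intro l x h
      have hne : l ≠ [] := by intro hc; rw [hc] at h; simp at h
      have hlen : 0 < l.length := List.length_pos_iff.mpr hne
      rw [PySem.List.pyRange_one_cons (by omega)]
      rw [List.foldl_cons]
      have hget : PySem.List.pyGetD l ((l.length : Int) - 1) 0 = x := by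
        rw [PySem.List.pyGetD_eq_getElem l 0 (by omega) (by omega)]
        simp only [show (((l.length : Int) - 1)).toNat = l.length - 1 from by omega]
        rw [← List.getLast_eq_getElem hne]
        rw [List.getLast?_eq_some_getLast hne] at h
        exact Option.some.inj h
      rw [hget]
      have h2 : (l ++ [f x]).getLast? = some (f x) := by simp
      have ih' := ih (l ++ [f x]) (f x) h2
      have hlen2 : ((l ++ [f x]).length : Int) = (l.length : Int) + 1 := by simp
      rw [hlen2] at ih'
      have harith : (l.length : Int) + 1 + (m : Int) = (l.length : Int) + ((m + 1 : Nat) : Int) := by push_cast; ring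
      rw [harith] at ih'
      rw [ih', List.range_succ_eq_map, List.map_cons, List.map_map]
      have hcomp : ((fun k => f^[k+1] x) ∘ Nat.succ) = (fun k => f^[k+1] (f x)) := by
        funext k; simp [Function.iterate_succ_apply]
      rw [hcomp]
      simp

-- B's recursive generator produces the iterates of f
lemma pvGen_eq_iterates (a b m : Int) :
    ∀ (k : Nat) (x : Int), pvGen a b m x k
      = (List.range (k+1)).map (fun j => (fun t => PySem.Int.mod (a * t + b) m)^[j] x) := by
  intro k
  induction k with
  | zero => intro x; simp [pvGen]
  | succ k' ih =>
      intro x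
      rw [pvGen, ih]
      rw [show k' + 1 + 1 = (k' + 1) + 1 from rfl, List.range_succ_eq_map]
      simp [Function.iterate_succ_apply, Function.comp_def]

-- the two programs build the same 100-term sequence
lemma sequences_agree (s0 a b m : Int) :
    (PySem.List.pyRange 1 100 1).foldl
        (fun s i => s ++ [PySem.Int.mod (a * PySem.List.pyGetD s (i - 1) 0 + b) m]) [s0]
      = pvGen a b m s0 99 := by
  have h : ([s0] : List Int).getLast? = some s0 := by simp
  have hA := foldl_idx_last (fun x => PySem.Int.mod (a * x + b) m) 99 [s0] s0 h
  have e1 : (([s0] : List Int).length : Int) = 1 := by simp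
  rw [e1, show (1 : Int) + ((99 : Nat) : Int) = 100 from by norm_num] at hA
  beta_reduce at hA
  rw [hA, pvGen_eq_iterates]
  rw [show (99 : Nat) + 1 = 100 from rfl, List.range_succ_eq_map]
  simp [Function.iterate_succ_apply, Function.comp_def]

-- getD after an insert-loop with a value depending only on the key
lemma getD_foldl_insert_not_mem (v : Int → Int) :
    ∀ (l : List Int) (d : PySem.Dict Int Int) (j : Int), j ∉ l →
    (l.foldl (fun d i => d.insert i (v i)) d).getD j 0 = d.getD j 0 := by
  intro l
  induction l with
  | nil => intro d j _; simp
  | cons x t ih =>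
      intro d j hj
      simp only [List.mem_cons, not_or] at hj
      rw [List.foldl_cons, ih _ _ hj.2, PySem.Dict.getD_insert_of_ne _ _ _ hj.1]

lemma getD_foldl_insert_fun (v : Int → Int) :
    ∀ (l : List Int) (d : PySem.Dict Int Int) (j : Int), j ∈ l →
    (l.foldl (fun d i => d.insert i (v i)) d).getD j 0 = v j := by
  intro l
  induction l with
  | nil => intro d j hj; simp at hj
  | cons x t ih =>
      intro d j hj
      rw [List.foldl_cons]
      by_cases hm : j ∈ t
      · exact ih _ _ hm
      · have hx : j = x := by rcases List.mem_cons.mp hj with h | h; exact h; exact absurd h hm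
        subst hx
        rw [getD_foldl_insert_not_mem v t _ _ hm, PySem.Dict.getD_insert_self]

-- A's dict-and-threshold pass counts the distinct duplicated values of S
lemma countA_eq (S : List Int) :
    (let d : PySem.Dict Int Int := S.foldl
        (fun d i => d.insert i ((PySem.List.count S i : Int))) PySem.Dict.empty
     d.keys.foldl (fun count j => if 1 < d.getD j 0 then count + 1 else count) (0 : Int))
    = (dupCount S : Int) := by
  have hkeys : (S.foldl (fun d i => d.insert i ((PySem.List.count S i : Int))) PySem.Dict.empty).keys
      = PySem.Set.ofList S := by
    rw [PySem.Dict.keys_foldl_insert]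
    simp [PySem.Dict.keys_empty, PySem.Set.update_nil_left]
  simp only at hkeys ⊢
  rw [hkeys]
  have main : ∀ (l : List Int) (c : Int), (∀ j ∈ l, j ∈ S) →
      l.foldl (fun count j => if 1 < (S.foldl (fun d i => d.insert i ((PySem.List.count S i : Int))) PySem.Dict.empty).getD j 0 then count + 1 else count) c
      = c + ((l.filter (fun x => decide (2 ≤ S.count x))).length : Int) := by
    intro l
    induction l with
    | nil => intro c _; simp
    | cons j t iht =>
        intro c hsub
        rw [List.foldl_cons]
        have hj : j ∈ S := hsub j List.mem_cons_self
        rw [getD_foldl_insert_fun _ S _ j hj]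
        have hcast : (1 : Int) < (PySem.List.count S j : Int) ↔ 2 ≤ S.count j := by
          simp [PySem.List.count]; omega
        by_cases hc : 2 ≤ S.count j
        · rw [if_pos (hcast.mpr hc), iht _ (fun x hx => hsub x (List.mem_cons_of_mem _ hx))]
          simp [hc]; ring
        · rw [if_neg (fun h => hc (hcast.mp h)), iht _ (fun x hx => hsub x (List.mem_cons_of_mem _ hx))]
          simp [hc]
  rw [main (PySem.Set.ofList S) 0 (fun j hj => by simp only [PySem.Set.mem_ofList] at hj; exact hj)]
  simp [dupCount]

-- dupCount only depends on membership-with-multiplicity: invariant under permutation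
lemma dupCount_perm {S T : List Int} (h : S.Perm T) : dupCount S = dupCount T := by
  unfold dupCount
  have hperm : ((PySem.Set.ofList S).filter (fun x => decide (2 ≤ S.count x))).Perm
      ((PySem.Set.ofList T).filter (fun x => decide (2 ≤ T.count x))) := by
    rw [List.perm_ext_iff_of_nodup ((PySem.Set.nodup_ofList S).filter _)
        ((PySem.Set.nodup_ofList T).filter _)]
    intro y
    simp only [List.mem_filter, PySem.Set.mem_ofList, decide_eq_true_eq]
    rw [h.mem_iff, h.count_eq]
  exact hperm.length_eq

-- on a sorted list, the recursive run scan computes dupCount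
lemma pvDups_eq_dupCount : ∀ (t : List Int), t.Pairwise (· ≤ ·) → pvDups t = (dupCount t : Int) := by
  intro t
  induction t using pvDups.induct with
  | case1 => intro _; simp [pvDups, dupCount]
  | case2 z => intro _; simp [pvDups, dupCount, PySem.Set.ofList]
  | case3 x r ih =>
      intro hp
      rw [pvDups, if_pos rfl]
      set t := x :: x :: r with ht
      set t' := t.filter (fun z => z != x) with ht'
      have hp' : t'.Pairwise (· ≤ ·) := hp.filter _
      rw [ih hp']
      have hxnot : x ∉ t' := by
        intro hx
        have := (List.mem_filter.mp hx).2
        simp at this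
      have hcnt : ∀ z : Int, z ≠ x → t'.count z = t.count z := by
        intro z hz
        rw [ht', List.count_filter]
        simp [bne_iff_ne, hz]
      have hperm : ((PySem.Set.ofList t).filter (fun w => decide (2 ≤ t.count w))).Perm
          (x :: (PySem.Set.ofList t').filter (fun w => decide (2 ≤ t'.count w))) := by
        rw [List.perm_ext_iff_of_nodup ((PySem.Set.nodup_ofList t).filter _)
            (List.nodup_cons.mpr ⟨fun hc => hxnot (by
              have h0 := (List.mem_filter.mp hc).1
              rwa [PySem.Set.mem_ofList] at h0), (PySem.Set.nodup_ofList t').filter _⟩)]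
        intro z
        simp only [List.mem_cons, List.mem_filter, PySem.Set.mem_ofList, decide_eq_true_eq]
        by_cases hz : z = x
        · subst hz
          constructor
          · intro _; exact Or.inl rfl
          · intro _
            refine ⟨List.mem_cons_self, ?_⟩
            rw [ht, List.count_cons_self, List.count_cons_self]
            omega
        · constructor
          · intro ⟨hm, hc⟩
            refine Or.inr ⟨?_, ?_⟩
            · rw [ht', List.mem_filter]
              exact ⟨hm, by simp [bne_iff_ne, hz]⟩
            · rw [hcnt z hz]; exact hc
          · rintro (h | ⟨hm, hc⟩)
            · exact absurd h hz
            · exact ⟨(List.mem_filter.mp hm).1, by rw [← hcnt z hz]; exact hc⟩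
      unfold dupCount
      rw [hperm.length_eq]
      simp; ring
  | case4 x y r hne ih =>
      intro hp
      rw [pvDups, if_neg hne]
      have hp' : (y :: r).Pairwise (· ≤ ·) := hp.tail
      rw [ih hp']
      have hxle : ∀ z ∈ y :: r, x ≤ z := fun z hz => (List.pairwise_cons.mp hp).1 z hz
      have hyle : ∀ z ∈ r, y ≤ z := fun z hz => (List.pairwise_cons.mp hp').1 z hz
      have hxnot : x ∉ y :: r := by
        rintro hx
        rcases List.mem_cons.mp hx with h | h
        · exact hne h
        · have h1 := hxle x hx
          have h2 := hyle x h
          have h3 := hxle y List.mem_cons_self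
          exact hne (le_antisymm h3 h2)
      have hcnt : ∀ z : Int, z ≠ x → (x :: y :: r).count z = (y :: r).count z := by
        intro z hz
        rw [List.count_cons]
        simp [Ne.symm hz]
      have hcx : (x :: y :: r).count x = 1 := by
        rw [List.count_cons_self, List.count_eq_zero_of_not_mem hxnot]
      have hperm : ((PySem.Set.ofList (x :: y :: r)).filter (fun w => decide (2 ≤ (x :: y :: r).count w))).Perm
          ((PySem.Set.ofList (y :: r)).filter (fun w => decide (2 ≤ (y :: r).count w))) := by
        rw [List.perm_ext_iff_of_nodup ((PySem.Set.nodup_ofList _).filter _)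
            ((PySem.Set.nodup_ofList _).filter _)]
        intro z
        simp only [List.mem_filter, PySem.Set.mem_ofList, decide_eq_true_eq]
        by_cases hz : z = x
        · subst hz
          constructor
          · intro ⟨_, hc⟩; rw [hcx] at hc; omega
          · intro ⟨hm, _⟩; exact absurd hm hxnot
        · rw [hcnt z hz]
          constructor
          · intro ⟨hm, hc⟩
            rcases List.mem_cons.mp hm with h | h
            · exact absurd h hz
            · exact ⟨h, hc⟩
          · intro ⟨hm, hc⟩; exact ⟨List.mem_cons_of_mem _ hm, hc⟩
      unfold dupCount
      rw [hperm.length_eq]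

-- ===== VERDICT (by name: the statement is the Claim_ definition above) =====
theorem periodicSequence_spec : Claim_equal_periodicSequence := by
  intro s0 a b m _ _
  unfold Spec_periodicSequence periodicSequence periodicSequence_alt
  rw [sequences_agree s0 a b m]
  rw [countA_eq]
  rw [pvDups_eq_dupCount _ (by simpa using PySem.List.sorted_pairwise (pvGen a b m s0 99) (fun x => x))]
  rw [dupCount_perm (PySem.List.sorted_perm (pvGen a b m s0 99) (fun x => x) false)]
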